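-- pv_equiv track=rewrite | github.com/Pin-ling/2021_InformationSecurity | encrytion/PlayfairCipher.py | PlayfairCipher
-- ===== SOURCE A (Python) =====
-- def generateKeyMatrix(key: str):
--     letters = []
--     alphabet = ['A', 'B', 'C', 'D', 'E', 'F', 'G', 'H', 'I', 'K', 'L', 'M', 'N', 'O', 'P', 'Q', 'R', 'S', 'T', 'U', 'V',
--                 'W', 'X', 'Y', 'Z']
--     for i in key:
--         if i not in letters:
--             letters.append(i)
--     for i in alphabet:
--         if i not in letters:
--             letters.append(i)
--
--     keyMatrix = []
--     for i in range(5):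
--         row = []
--         for j in range(5):
--             row.append(letters[i * 5 + j])
--         keyMatrix.append(row)
--
--     return keyMatrix
--
-- def encryptPlayfairCipher(keyMatrix, letter1, letter2):
--     row1, col1, row2, col2 = 0, 0 ,0 ,0
--     for i in range(5):
--         for j in range(5):
--             if keyMatrix[i][j] == letter1:
--                 row1 = i
--                 col1 = j
--             if keyMatrix[i][j] == letter2:
--                 row2 = i
--                 col2 = j
--     if row1 == row2:
--         return keyMatrix[row1][(col1 + 1) % 5] + keyMatrix[row2][(col2 + 1) % 5]
--     elif col1 == col2:
--         return keyMatrix[(row1 + 1) % 5][col1] + keyMatrix[(row2 + 1) % 5][col2]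
--     else:
--         return keyMatrix[row1][col2] + keyMatrix[row2][col1]
--
-- def PlayfairCipher(key: str, message: str):
--     plainText = message.replace('J','I')    # I & J 視為相同
--     newKey = key.replace('J','I')
--     keyMatrix = generateKeyMatrix(newKey)
--     ciphertext = ''
--     current = 0
--     while(current < len(plainText)):
--         if current == len(plainText) - 1:   # 最後只剩一個
--             ciphertext += encryptPlayfairCipher(keyMatrix, plainText[current], 'X')
--             current += 1
--         elif (plainText[current] == plainText[current + 1]):    # pair中的兩個字相同
--             ciphertext += encryptPlayfairCipher(keyMatrix, plainText[current], 'X')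
--             current += 1
--         else:
--             ciphertext += encryptPlayfairCipher(keyMatrix, plainText[current], plainText[current + 1])
--             current += 2
--     return ciphertext
-- ===== SOURCE B (Python) =====
-- ALPHABET = "ABCDEFGHIKLMNOPQRSTUVWXYZ"
--
-- def PlayfairCipher(key: str, message: str):
--     plain = message.replace('J', 'I')
--     base = list(dict.fromkeys(key.replace('J', 'I')))
--     grid = (base + [c for c in ALPHABET if c not in base])[:25]
--     pos = {ch: i for i, ch in enumerate(grid)}
--
--     def encPos(i, j):
--         r1, c1 = divmod(i, 5)
--         r2, c2 = divmod(j, 5)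
--         if r1 == r2:
--             return grid[r1 * 5 + (c1 + 1) % 5] + grid[r2 * 5 + (c2 + 1) % 5]
--         if c1 == c2:
--             return grid[((r1 + 1) % 5) * 5 + c1] + grid[((r2 + 1) % 5) * 5 + c2]
--         return grid[r1 * 5 + c2] + grid[r2 * 5 + c1]
--
--     # full digram substitution table, built once: table[i*25+j] encrypts the
--     # pair of letters at flat grid positions i and j
--     table = [encPos(i, j) for i in range(25) for j in range(25)]
--
--     # pairing pass: one-char buffer instead of index arithmetic
--     pairs = []
--     buf = None
--     for ch in plain:
--         if buf is None:
--             buf = ch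
--         elif ch != buf:
--             pairs.append((buf, ch))
--             buf = None
--         else:
--             pairs.append((buf, 'X'))
--             buf = ch
--     if buf is not None:
--         pairs.append((buf, 'X'))
--
--     return ''.join(table[pos.get(a, 0) * 25 + pos.get(b, 0)] for a, b in pairs)
-- ===== Notes on version B (the rewrite author's own statement) =====
-- stated objective: faster
-- what changed: B precomputes a full 625-entry digram substitution table (grid built once from dedup(key)+remaining alphabet, position dict ch->flat index), splits the message into digrams in a separate buffer-based pass over the characters (no index arithmetic), and then encrypts each digram by a single table lookup, instead of A's index-driven while loop that rescans the 5x5 matrix for every pair; pos.get default 0 matches A's untouched scan state for characters outside the grid.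
import Mathlib
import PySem

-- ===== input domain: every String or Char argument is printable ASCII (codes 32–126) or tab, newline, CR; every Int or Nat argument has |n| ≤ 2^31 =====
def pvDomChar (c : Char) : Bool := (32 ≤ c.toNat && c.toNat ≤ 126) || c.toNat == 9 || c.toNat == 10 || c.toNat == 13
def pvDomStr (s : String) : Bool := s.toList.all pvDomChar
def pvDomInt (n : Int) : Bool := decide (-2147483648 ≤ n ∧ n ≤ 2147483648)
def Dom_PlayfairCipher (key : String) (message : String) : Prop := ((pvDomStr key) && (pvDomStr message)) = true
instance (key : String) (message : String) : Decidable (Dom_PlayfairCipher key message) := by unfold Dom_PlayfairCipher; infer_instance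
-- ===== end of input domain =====

-- B precomputes a full 625-entry digram substitution table and splits the message into
-- digrams in a separate buffer-based pass, replacing A's per-pair 5x5 scans and index loop
-- (alternative decomposition; return value only, no side effects in either version).


-- ===== PORT A =====

def pvAlphabetA : List Char :=
  ['A','B','C','D','E','F','G','H','I','K','L','M','N','O','P','Q','R','S','T','U','V','W','X','Y','Z']

-- generateKeyMatrix: dedup key letters, then missing alphabet letters; 5x5 matrix of
-- letters[i*5+j] (the index is always in range — letters keeps all 25 alphabet letters —
-- so .getD ' ' is only a totality guard where Python would raise IndexError).
def generateKeyMatrixA (key : List Char) : List (List Char) :=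
  let letters := key.foldl (fun ls i => if ls.contains i then ls else ls ++ [i]) []
  let letters := pvAlphabetA.foldl (fun ls i => if ls.contains i then ls else ls ++ [i]) letters
  (List.range 5).foldl (fun km i =>
    km ++ [(List.range 5).foldl (fun row j => row ++ [letters.getD (i * 5 + j) ' ']) []]) []

-- encryptPlayfairCipher: the four scan variables row1,col1,row2,col2 as ((r1,c1),(r2,c2));
-- returns the 2-character result as a List Char (Python: string concatenation of two letters).
def encryptPlayfairCipherA (km : List (List Char)) (l1 l2 : Char) : List Char :=
  let st := (List.range 5).foldl (fun st i =>
      (List.range 5).foldl (fun st j =>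
        let st := if (km.getD i []).getD j ' ' == l1 then ((i, j), st.2) else st
        if (km.getD i []).getD j ' ' == l2 then (st.1, (i, j)) else st) st) ((0, 0), (0, 0))
  let r1 := st.1.1; let c1 := st.1.2; let r2 := st.2.1; let c2 := st.2.2
  if r1 == r2 then
    [(km.getD r1 []).getD ((c1 + 1) % 5) ' ', (km.getD r2 []).getD ((c2 + 1) % 5) ' ']
  else if c1 == c2 then
    [(km.getD ((r1 + 1) % 5) []).getD c1 ' ', (km.getD ((r2 + 1) % 5) []).getD c2 ' ']
  else
    [(km.getD r1 []).getD c2 ' ', (km.getD r2 []).getD c1 ' ']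

-- the while loop over `current` (ciphertext += …; indexing pt[current] is always in range
-- under the loop guards, so .getD ' ' is only a totality guard).
def loopA (km : List (List Char)) (pt : List Char) (cipher : List Char) (current : Nat) :
    List Char :=
  if current < pt.length then
    if current == pt.length - 1 then
      loopA km pt (cipher ++ encryptPlayfairCipherA km (pt.getD current ' ') 'X') (current + 1)
    else if pt.getD current ' ' == pt.getD (current + 1) ' ' then
      loopA km pt (cipher ++ encryptPlayfairCipherA km (pt.getD current ' ') 'X') (current + 1)
    else
      loopA km pt
        (cipher ++ encryptPlayfairCipherA km (pt.getD current ' ') (pt.getD (current + 1) ' '))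
        (current + 2)
  else cipher
termination_by pt.length - current

def PlayfairCipher (key : String) (message : String) : String :=
  let plainText := (PySem.Str.replace message "J" "I").toList
  let newKey := (PySem.Str.replace key "J" "I").toList
  let keyMatrix := generateKeyMatrixA newKey
  String.ofList (loopA keyMatrix plainText [] 0)

-- ===== PORT B =====

def pvAlphaB : List Char := "ABCDEFGHIKLMNOPQRSTUVWXYZ".toList

-- grid = (list(dict.fromkeys(key')) + [c for c in ALPHABET if c not in base])[:25]
def gridB (key' : List Char) : List Char :=
  let base := PySem.List.dedup key'
  (base ++ pvAlphaB.filter (fun c => !base.contains c)).take 25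

-- pos = {ch: i for i, ch in enumerate(grid)}  (enumerate indices are ≥ 0, so .toNat is exact)
def posB (grid : List Char) : PySem.Dict Char Nat :=
  (PySem.List.enumerate grid).foldl
    (fun d p => d.insert p.2 p.1.toNat) PySem.Dict.empty

-- encPos(i, j): direct flat-grid addressing (grid indices are < 25, .getD ' ' is only a
-- totality guard; divmod on the nonnegative flat indices is Nat's / and %).
def encPosB (grid : List Char) (i j : Nat) : List Char :=
  let r1 := i / 5; let c1 := i % 5
  let r2 := j / 5; let c2 := j % 5
  if r1 == r2 then
    [grid.getD (r1 * 5 + (c1 + 1) % 5) ' ', grid.getD (r2 * 5 + (c2 + 1) % 5) ' ']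
  else if c1 == c2 then
    [grid.getD ((r1 + 1) % 5 * 5 + c1) ' ', grid.getD ((r2 + 1) % 5 * 5 + c2) ' ']
  else
    [grid.getD (r1 * 5 + c2) ' ', grid.getD (r2 * 5 + c1) ' ']

-- table = [encPos(i, j) for i in range(25) for j in range(25)]
def tableB (grid : List Char) : List (List Char) :=
  (List.range 25).flatMap (fun i => (List.range 25).map (fun j => encPosB grid i j))

-- the pairing pass: a one-char buffer (`buf`), pairs collected in order
def pairsB (pt : List Char) : List (Char × Char) :=
  let st := pt.foldl (fun (st : List (Char × Char) × Option Char) ch =>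
    match st.2 with
    | none => (st.1, some ch)
    | some b => if ch ≠ b then (st.1 ++ [(b, ch)], none) else (st.1 ++ [(b, 'X')], some ch))
    ([], none)
  match st.2 with
  | some b => st.1 ++ [(b, 'X')]
  | none => st.1

def PlayfairCipher_alt (key : String) (message : String) : String :=
  let plain := (PySem.Str.replace message "J" "I").toList
  let grid := gridB ((PySem.Str.replace key "J" "I").toList)
  let pos := posB grid
  let table := tableB grid
  String.ofList (PySem.Chars.join []
    ((pairsB plain).map (fun p => table.getD (pos.getD p.1 0 * 25 + pos.getD p.2 0) [])))

-- ===== PRECONDITION & SPEC =====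
def Spec_PlayfairCipher (key : String) (message : String) (out : String) : Prop := out = PlayfairCipher_alt key message
instance (key : String) (message : String) (out : String) : Decidable (Spec_PlayfairCipher key message out) := by unfold Spec_PlayfairCipher; infer_instance

-- ===== CLAIM (what is proved, stated in full; the proofs are below) =====
def Claim_equal_PlayfairCipher : Prop := ∀ (key : String) (message : String), Dom_PlayfairCipher key message → Spec_PlayfairCipher key message (PlayfairCipher key message)

-- ===== LEMMAS AND PROOFS =====

-- the letter ordering both programs build, and the flat position both assign to a letter
def lettersOf (k : List Char) : List Char :=
  PySem.List.dedup k ++ pvAlphabetA.filter (fun c => !(PySem.List.dedup k).contains c)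

def posFlat (g : List Char) (l : Char) : Nat :=
  match PySem.List.index? g l with
  | some p => p
  | none => 0

-- A's append-if-new loop over a duplicate-free list appends exactly the new elements
theorem foldl_add_eq_append_filter (xs : List Char) (hx : xs.Nodup) : ∀ s : List Char,
    xs.foldl (fun ls i => if ls.contains i then ls else ls ++ [i]) s
      = s ++ xs.filter (fun x => !s.contains x) := by
  induction xs with
  | nil => intro s; simp
  | cons x xs ih =>
    intro s
    obtain ⟨hnx, hnd⟩ := List.nodup_cons.mp hx
    simp only [List.foldl_cons, List.filter_cons]
    by_cases hc : s.contains x = true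
    · rw [if_pos hc, ih hnd s, if_neg (by rw [hc]; simp)]
    · have hc' : s.contains x = false := by simpa using hc
      have hfc : xs.filter (fun y => !(s ++ [x]).contains y)
          = xs.filter (fun y => !s.contains y) :=
        List.filter_congr (fun y hy => by
          have hxy : y ≠ x := fun e => hnx (e ▸ hy)
          simp [hxy])
      rw [if_neg hc, ih hnd (s ++ [x]), hfc, if_pos (by simpa using hc)]
      simp

theorem letters_eq (k : List Char) :
    pvAlphabetA.foldl (fun ls i => if ls.contains i then ls else ls ++ [i])
      (k.foldl (fun ls i => if ls.contains i then ls else ls ++ [i]) [])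
      = lettersOf k := by
  have h1 : k.foldl (fun ls i => if ls.contains i then ls else ls ++ [i]) []
      = PySem.List.dedup k := by
    rw [PySem.List.dedup_eq_ofList, PySem.Set.ofList_eq_foldl]
    rfl
  rw [h1, foldl_add_eq_append_filter pvAlphabetA (by decide), lettersOf]

theorem grid_eq_take (k : List Char) : gridB k = (lettersOf k).take 25 := by
  have : pvAlphaB = pvAlphabetA := by decide
  simp [gridB, lettersOf, this]

theorem letters_len (k : List Char) : 25 ≤ (lettersOf k).length := by
  set b := PySem.List.dedup k with hb
  have hbn : b.Nodup := PySem.List.nodup_dedup k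
  have hsplit := List.length_eq_length_filter_add (l := pvAlphabetA) (fun c => !b.contains c)
  have hlen : pvAlphabetA.length = 25 := by decide
  have hRsub : (pvAlphabetA.filter (fun x => !(!b.contains x))).length ≤ b.length := by
    apply List.Subperm.length_le
    apply List.Nodup.subperm (List.Nodup.filter _ (by decide))
    intro x hx
    have := List.of_mem_filter hx
    simp only [Bool.not_not] at this
    exact List.contains_iff_mem.mp this
  simp only [lettersOf, List.length_append, ← hb]
  omega

theorem grid_len (k : List Char) : (gridB k).length = 25 := by
  rw [grid_eq_take, List.length_take]
  have := letters_len k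
  omega

theorem grid_nodup (k : List Char) : (gridB k).Nodup := by
  rw [grid_eq_take]
  apply List.Nodup.sublist (List.take_sublist _ _)
  rw [lettersOf, List.nodup_append]
  refine ⟨PySem.List.nodup_dedup k, List.Nodup.filter _ (by decide), ?_⟩
  intro x hx b hb e
  subst e
  have h1 : ¬ x ∈ k := by simpa using List.of_mem_filter hb
  exact h1 (by simpa using hx)

theorem grid_getD (k : List Char) (n : Nat) (hn : n < 25) (d : Char) :
    (gridB k).getD n d = (lettersOf k).getD n d := by
  rw [grid_eq_take]
  simp [List.getD_eq_getElem?_getD, hn]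

-- the 5x5 matrix entry (r, c) is the flat-grid entry r*5+c
theorem km_getD (k : List Char) (r c : Nat) (hr : r < 5) (hc : c < 5) :
    ((generateKeyMatrixA k).getD r []).getD c ' ' = (gridB k).getD (r * 5 + c) ' ' := by
  have hkm : generateKeyMatrixA k
      = (List.range 5).map (fun i =>
          (List.range 5).map (fun j => (lettersOf k).getD (i * 5 + j) ' ')) := by
    simp only [generateKeyMatrixA, letters_eq k, PySem.List.foldl_append_singleton_eq_map,
      List.nil_append]
  rw [hkm, PySem.List.getD_map_range _ _ _ _ hr, PySem.List.getD_map_range _ _ _ _ hc,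
    grid_getD k _ (by omega)]

-- a nested fold over two ranges is a flat fold over the pair list
theorem foldl_foldl_flatMap {σ α β : Type} (l : List α) (m : α → List β)
    (f : σ → α → β → σ) : ∀ st0 : σ,
    l.foldl (fun st a => (m a).foldl (fun st b => f st a b) st) st0
      = (l.flatMap (fun a => (m a).map (fun b => (a, b)))).foldl (fun st p => f st p.1 p.2) st0 := by
  induction l with
  | nil => intro st0; rfl
  | cons a l ih =>
    intro st0
    simp only [List.foldl_cons, List.flatMap_cons, List.foldl_append, List.foldl_map]
    exact ih _

theorem pairs_eq : (List.range 5).flatMap (fun a => (List.range 5).map (fun b => (a, b)))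
    = (List.range 25).map (fun n => (n / 5, n % 5)) := by decide

-- the "remember the last (= only) hit" fold equals a first-index lookup
theorem lastFind (g : List Char) (l : Char) (d : Char) (hg : g.Nodup) :
    ∀ (m : Nat), m ≤ g.length → ∀ s0 : Nat × Nat,
    (List.range m).foldl (fun s n => if g.getD n d == l then (n / 5, n % 5) else s) s0
      = (match PySem.List.index? (g.take m) l with
         | some p => (p / 5, p % 5)
         | none => s0) := by
  intro m
  induction m with
  | zero =>
    intro _ s0
    simp [PySem.List.index?]
  | succ m ih =>
    intro hm s0
    have hmlt : m < g.length := by omega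
    have htake : g.take (m + 1) = g.take m ++ [g[m]] := by
      rw [List.take_add_one, List.getElem?_eq_getElem hmlt]
      rfl
    have hgetD : g.getD m d = g[m] := by
      simp [List.getD_eq_getElem?_getD, List.getElem?_eq_getElem hmlt]
    have hnotin : g[m] ∉ g.take m := by
      intro hmem
      obtain ⟨j, hj, hje⟩ := List.mem_iff_getElem.mp hmem
      rw [List.length_take] at hj
      have hjm : j < m := by omega
      rw [List.getElem_take] at hje
      exact absurd (List.Nodup.getElem_inj_iff hg |>.mp hje) (by omega)
    rw [List.range_succ, List.foldl_append, ih (by omega) s0, List.foldl_cons, List.foldl_nil,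
      htake]
    by_cases he : g[m] = l
    · subst he
      rw [if_pos (by rw [hgetD]; exact beq_self_eq_true _),
        PySem.List.index?_append_singleton_self _ _ hnotin, List.length_take,
        Nat.min_eq_left (Nat.le_of_lt hmlt)]
    · have hne : ¬ ((g.getD m d == l) = true) := by
        rw [hgetD]
        simp [he]
      rw [if_neg hne]
      by_cases hl : l ∈ g.take m
      · rw [PySem.List.index?_append_of_mem _ hl]
      · have h1 : PySem.List.index? (g.take m) l = none :=
          (PySem.List.index?_eq_none_iff _ _).mpr hl
        have h2 : PySem.List.index? (g.take m ++ [g[m]]) l = none := by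
          rw [PySem.List.index?_eq_none_iff]
          simp only [List.mem_append, List.mem_singleton]
          rintro (h | h)
          · exact hl h
          · exact he h.symm
        rw [h1, h2]

theorem posFlat_lt (g : List Char) (hlen : g.length = 25) (l : Char) : posFlat g l < 25 := by
  unfold posFlat
  rcases h : PySem.List.index? g l with _ | p
  · decide
  · obtain ⟨hk, -, -⟩ := PySem.List.getElem_of_index?_eq_some h
    show p < 25
    omega

-- A's nested 5x5 scan computes the (row, col) of posFlat for both letters
theorem scan_eq (k : List Char) (l1 l2 : Char) :
    (List.range 5).foldl (fun st i =>
      (List.range 5).foldl (fun st j =>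
        let st := if ((generateKeyMatrixA k).getD i []).getD j ' ' == l1 then ((i, j), st.2) else st
        if ((generateKeyMatrixA k).getD i []).getD j ' ' == l2 then (st.1, (i, j)) else st) st)
      (((0, 0), (0, 0)) : (Nat × Nat) × (Nat × Nat))
    = ((posFlat (gridB k) l1 / 5, posFlat (gridB k) l1 % 5),
       (posFlat (gridB k) l2 / 5, posFlat (gridB k) l2 % 5)) := by
  set g := gridB k with hgdef
  have hcell : ∀ st : (Nat × Nat) × (Nat × Nat), ∀ i ∈ List.range 5,
      (List.range 5).foldl (fun st j =>
        let st := if ((generateKeyMatrixA k).getD i []).getD j ' ' == l1 then ((i, j), st.2) else st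
        if ((generateKeyMatrixA k).getD i []).getD j ' ' == l2 then (st.1, (i, j)) else st) st
      = (List.range 5).foldl (fun st j =>
        let st := if g.getD (i * 5 + j) ' ' == l1 then ((i, j), st.2) else st
        if g.getD (i * 5 + j) ' ' == l2 then (st.1, (i, j)) else st) st := by
    intro st i hi
    apply PySem.List.foldl_congr_mem
    intro st2 j hj
    rw [km_getD k i j (List.mem_range.mp hi) (List.mem_range.mp hj)]
  rw [PySem.List.foldl_congr_mem _ _ _ _ hcell,
    foldl_foldl_flatMap (List.range 5) (fun _ => List.range 5)
      (fun st i j =>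
        let st := if g.getD (i * 5 + j) ' ' == l1 then ((i, j), st.2) else st
        if g.getD (i * 5 + j) ' ' == l2 then (st.1, (i, j)) else st),
    pairs_eq, List.foldl_map]
  rw [PySem.List.foldl_congr_mem _ _
    (fun st n =>
      ((if g.getD n ' ' == l1 then (n / 5, n % 5) else st.1),
       (if g.getD n ' ' == l2 then (n / 5, n % 5) else st.2))) _
    (by
      intro st n hn
      have h55 : n / 5 * 5 + n % 5 = n := by omega
      simp only [h55]
      cases h1 : g.getD n ' ' == l1 <;> cases h2 : g.getD n ' ' == l2 <;> simp)]
  rw [PySem.List.foldl_prod_mk (f := fun s n => if g.getD n ' ' == l1 then (n / 5, n % 5) else s)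
    (g := fun s n => if g.getD n ' ' == l2 then (n / 5, n % 5) else s)]
  have h25 : (25 : Nat) ≤ g.length := by rw [hgdef, grid_len]
  have htake : g.take 25 = g := List.take_of_length_le (le_of_eq (by rw [hgdef, grid_len]))
  rw [lastFind g l1 ' ' (hgdef ▸ grid_nodup k) 25 h25,
    lastFind g l2 ' ' (hgdef ▸ grid_nodup k) 25 h25, htake]
  unfold posFlat
  rcases PySem.List.index? g l1 with _ | p <;> rcases PySem.List.index? g l2 with _ | q <;> rfl

-- B's dictionary lookup computes posFlat
theorem pos_getD (g : List Char) (hg : g.Nodup) (l : Char) :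
    (posB g).getD l 0 = posFlat g l := by
  have hmapk : (PySem.List.enumerate g 0).map (fun p => p.2) = g :=
    PySem.List.map_snd_enumerate g 0
  have hitems : (posB g).items
      = (PySem.List.enumerate g 0).map (fun p => (p.2, p.1.toNat)) := by
    unfold posB
    rw [PySem.Dict.items_foldl_insert_fresh (PySem.List.enumerate g 0)
      (fun p => p.2) (fun p => p.1.toNat) PySem.Dict.empty
      (by intro a _; simp [PySem.Dict.contains_empty])
      (by rw [hmapk]; exact hg)]
    simp [PySem.Dict.empty]
  have hkeys : (posB g).keys = g := by
    show (posB g).items.map (fun p => p.1) = g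
    rw [hitems, List.map_map]
    exact hmapk
  unfold posFlat
  rcases h : PySem.List.index? g l with _ | p
  · have hnl : l ∉ g := (PySem.List.index?_eq_none_iff _ _).mp h
    have hnone : (posB g).get? l = none := by
      rw [PySem.Dict.get?_eq_none_iff_not_mem_keys, hkeys]
      exact hnl
    simp [PySem.Dict.getD, hnone]
  · obtain ⟨hk, hgl, -⟩ := PySem.List.getElem_of_index?_eq_some h
    have hmem : ((p : Int), g[p]) ∈ PySem.List.enumerate g 0 := by
      rw [PySem.List.mem_enumerate_iff]
      exact ⟨p, hk, by simp⟩
    have hitem : (l, p) ∈ (posB g).items := by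
      rw [hitems]
      refine List.mem_map.mpr ⟨((p : Int), g[p]), hmem, ?_⟩
      simp [hgl]
    exact PySem.Dict.getD_of_mem_items _ hitem (by rw [hkeys]; exact hg) _

-- indexing the flatMap-of-ranges table: entry i*25+j is f i j
theorem table_getD_gen {α : Type} (f : Nat → Nat → α) (d : α) (a : Nat) :
    ∀ (i j : Nat), i < a → j < 25 →
    ((List.range a).flatMap (fun i => (List.range 25).map (fun j => f i j))).getD (i * 25 + j) d
      = f i j := by
  induction a with
  | zero => intro i j hi _; omega
  | succ a ih =>
    intro i j hi hj
    rw [show List.range (a + 1) = List.range a ++ [a] from List.range_succ,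
      List.flatMap_append, List.flatMap_singleton]
    have hlen : ((List.range a).flatMap
        (fun i => (List.range 25).map (fun j => f i j))).length = a * 25 := by
      rw [List.length_flatMap]
      simp
    by_cases hia : i < a
    · have hidx : i * 25 + j < a * 25 := by
        calc i * 25 + j < i * 25 + 25 := by omega
        _ = (i + 1) * 25 := by ring
        _ ≤ a * 25 := Nat.mul_le_mul_right 25 hia
      rw [List.getD_append _ _ _ _ (by omega), ih i j hia hj]
    · have hie : i = a := by omega
      subst hie
      rw [List.getD_append_right _ _ _ _ (by omega), hlen]
      have : i * 25 + j - i * 25 = j := by omega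
      rw [this, PySem.List.getD_map_range _ _ _ _ hj]

theorem table_getD (g : List Char) (i j : Nat) (hi : i < 25) (hj : j < 25) :
    (tableB g).getD (i * 25 + j) [] = encPosB g i j :=
  table_getD_gen _ [] 25 i j hi hj

-- the table lookup at the two flat positions is A's pair encryption
theorem lookup_eq (k : List Char) (a b : Char) :
    (tableB (gridB k)).getD
      ((posB (gridB k)).getD a 0 * 25 + (posB (gridB k)).getD b 0) []
      = encryptPlayfairCipherA (generateKeyMatrixA k) a b := by
  rw [pos_getD (gridB k) (grid_nodup k) a, pos_getD (gridB k) (grid_nodup k) b,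
    table_getD _ _ _ (posFlat_lt _ (grid_len k) a) (posFlat_lt _ (grid_len k) b)]
  unfold encryptPlayfairCipherA encPosB
  rw [scan_eq k a b]
  set i := posFlat (gridB k) a with hi
  set j := posFlat (gridB k) b with hj
  have hi25 : i < 25 := hi ▸ posFlat_lt _ (grid_len k) a
  have hj25 : j < 25 := hj ▸ posFlat_lt _ (grid_len k) b
  have h1r : i / 5 < 5 := by omega
  have h1c : i % 5 < 5 := by omega
  have h2r : j / 5 < 5 := by omega
  have h2c : j % 5 < 5 := by omega
  cases hrow : i / 5 == j / 5
  · simp only [hrow, Bool.false_eq_true, if_false]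
    cases hcol : i % 5 == j % 5
    · simp only [Bool.false_eq_true, if_false]
      rw [km_getD k (i / 5) (j % 5) h1r h2c, km_getD k (j / 5) (i % 5) h2r h1c]
    · simp only [if_true]
      rw [km_getD k ((i / 5 + 1) % 5) (i % 5) (Nat.mod_lt _ (by omega)) h1c,
        km_getD k ((j / 5 + 1) % 5) (j % 5) (Nat.mod_lt _ (by omega)) h2c]
  · simp only [hrow, if_true]
    rw [km_getD k (i / 5) ((i % 5 + 1) % 5) h1r (Nat.mod_lt _ (by omega)),
      km_getD k (j / 5) ((j % 5 + 1) % 5) h2r (Nat.mod_lt _ (by omega))]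

-- the digram splitting both loops perform, as a recursion on the character list
def digrams : List Char → List (Char × Char)
  | [] => []
  | [a] => [(a, 'X')]
  | a :: b :: rest =>
      if a = b then (a, 'X') :: digrams (b :: rest)
      else (a, b) :: digrams rest

-- B's buffer fold computes digrams
theorem pairs_fold (l : List Char) : ∀ acc : List (Char × Char),
    ((match (l.foldl (fun (st : List (Char × Char) × Option Char) ch =>
        match st.2 with
        | none => (st.1, some ch)
        | some b => if ch ≠ b then (st.1 ++ [(b, ch)], none) else (st.1 ++ [(b, 'X')], some ch))
        (acc, none)).2 with
      | some b => (l.foldl (fun (st : List (Char × Char) × Option Char) ch =>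
        match st.2 with
        | none => (st.1, some ch)
        | some b => if ch ≠ b then (st.1 ++ [(b, ch)], none) else (st.1 ++ [(b, 'X')], some ch))
        (acc, none)).1 ++ [(b, 'X')]
      | none => (l.foldl (fun (st : List (Char × Char) × Option Char) ch =>
        match st.2 with
        | none => (st.1, some ch)
        | some b => if ch ≠ b then (st.1 ++ [(b, ch)], none) else (st.1 ++ [(b, 'X')], some ch))
        (acc, none)).1) = acc ++ digrams l)
    ∧ ∀ b0 : Char,
    ((match (l.foldl (fun (st : List (Char × Char) × Option Char) ch =>
        match st.2 with
        | none => (st.1, some ch)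
        | some b => if ch ≠ b then (st.1 ++ [(b, ch)], none) else (st.1 ++ [(b, 'X')], some ch))
        (acc, some b0)).2 with
      | some b => (l.foldl (fun (st : List (Char × Char) × Option Char) ch =>
        match st.2 with
        | none => (st.1, some ch)
        | some b => if ch ≠ b then (st.1 ++ [(b, ch)], none) else (st.1 ++ [(b, 'X')], some ch))
        (acc, some b0)).1 ++ [(b, 'X')]
      | none => (l.foldl (fun (st : List (Char × Char) × Option Char) ch =>
        match st.2 with
        | none => (st.1, some ch)
        | some b => if ch ≠ b then (st.1 ++ [(b, ch)], none) else (st.1 ++ [(b, 'X')], some ch))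
        (acc, some b0)).1) = acc ++ digrams (b0 :: l)) := by
  induction l with
  | nil =>
    intro acc
    exact ⟨by simp [digrams], fun b0 => by simp [digrams]⟩
  | cons ch l ih =>
    intro acc
    constructor
    · simpa using (ih acc).2 ch
    · intro b0
      simp only [List.foldl_cons]
      by_cases hne : ch ≠ b0
      · have : digrams (b0 :: ch :: l) = (b0, ch) :: digrams l := by
          rw [digrams, if_neg (fun e => hne e.symm)]
        rw [this]
        simpa [hne] using ((ih (acc ++ [(b0, ch)])).1).trans (by simp)
      · have hne' : ch = b0 := not_not.mp hne
        subst hne'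
        have : digrams (ch :: ch :: l) = (ch, 'X') :: digrams (ch :: l) := by
          rw [digrams, if_pos rfl]
        rw [this]
        simpa using (((ih (acc ++ [(ch, 'X')])).2 ch)).trans (by simp)

theorem pairsB_eq (pt : List Char) : pairsB pt = digrams pt := by
  have := (pairs_fold pt []).1
  simpa [pairsB] using this

theorem join_nil_cons (p : List Char) (ps : List (List Char)) :
    PySem.Chars.join [] (p :: ps) = p ++ PySem.Chars.join [] ps := by
  cases ps with
  | nil => simp [PySem.Chars.join_singleton, PySem.Chars.join_nil]
  | cons q rest =>
    rw [PySem.Chars.join_cons_cons]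
    simp

-- A's index-driven while loop is the join of the digram encryptions
theorem loopA_eq (km : List (List Char)) (pt : List Char) :
    ∀ (fuel cur : Nat), pt.length - cur ≤ fuel → ∀ acc : List Char,
    loopA km pt acc cur
      = acc ++ PySem.Chars.join []
          ((digrams (pt.drop cur)).map (fun p => encryptPlayfairCipherA km p.1 p.2)) := by
  intro fuel
  induction fuel with
  | zero =>
    intro cur hf acc
    have hge : ¬ cur < pt.length := by omega
    rw [loopA, if_neg hge, List.drop_eq_nil_of_le (by omega)]
    simp [digrams, PySem.Chars.join_nil]
  | succ fuel ih =>
    intro cur hf acc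
    rw [loopA]
    by_cases hcur : cur < pt.length
    · have hgetD : pt.getD cur ' ' = pt[cur] := by
        simp [List.getD_eq_getElem?_getD, List.getElem?_eq_getElem hcur]
      have hdrop : pt.drop cur = pt[cur] :: pt.drop (cur + 1) :=
        List.drop_eq_getElem_cons hcur
      rw [if_pos hcur]
      by_cases hlast : cur = pt.length - 1
      · have hnil : pt.drop (cur + 1) = [] := List.drop_eq_nil_of_le (by omega)
        have hdig : digrams (pt.drop cur) = [(pt[cur], 'X')] := by
          rw [hdrop, hnil]; rfl
        have hdignil : digrams ([] : List Char) = [] := rfl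
        rw [if_pos (by simp [hlast]), ih (cur + 1) (by omega) _, hnil, hdig, hgetD, hdignil]
        simp [PySem.Chars.join_nil]
      · have hlt : cur + 1 < pt.length := by omega
        have hgetD1 : pt.getD (cur + 1) ' ' = pt[cur + 1] := by
          simp [List.getD_eq_getElem?_getD, List.getElem?_eq_getElem hlt]
        have hdrop1 : pt.drop (cur + 1) = pt[cur + 1] :: pt.drop (cur + 2) :=
          List.drop_eq_getElem_cons hlt
        rw [if_neg (by simp [hlast])]
        by_cases heq : pt[cur] = pt[cur + 1]
        · have hdig : digrams (pt.drop cur)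
              = (pt[cur], 'X') :: digrams (pt.drop (cur + 1)) := by
            rw [hdrop, hdrop1, digrams, if_pos heq, ← hdrop1]
          rw [if_pos (by rw [hgetD, hgetD1]; exact beq_iff_eq.mpr heq),
            ih (cur + 1) (by omega) _, hdig]
          simp only [List.map_cons, join_nil_cons, hgetD, List.append_assoc]
        · have hdig : digrams (pt.drop cur)
              = (pt[cur], pt[cur + 1]) :: digrams (pt.drop (cur + 2)) := by
            rw [hdrop, hdrop1, digrams, if_neg heq]
          rw [if_neg (by rw [hgetD, hgetD1]; simp [heq]),
            ih (cur + 2) (by omega) _, hdig]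
          simp only [List.map_cons, join_nil_cons, hgetD, hgetD1, List.append_assoc]
    · rw [if_neg hcur, List.drop_eq_nil_of_le (by omega)]
      simp [digrams, PySem.Chars.join_nil]

-- ===== VERDICT (by name: the statement is the Claim_ definition above) =====
set_option maxHeartbeats 1000000 in
theorem PlayfairCipher_spec : Claim_equal_PlayfairCipher := by
  intro key message _
  unfold Spec_PlayfairCipher PlayfairCipher PlayfairCipher_alt
  simp only
  set k := (PySem.Str.replace key "J" "I").toList with hk
  set pt := (PySem.Str.replace message "J" "I").toList with hpt
  have hmap : (digrams pt).map
      (fun p => (tableB (gridB k)).getD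
        ((posB (gridB k)).getD p.1 0 * 25 + (posB (gridB k)).getD p.2 0) [])
      = (digrams pt).map
        (fun p => encryptPlayfairCipherA (generateKeyMatrixA k) p.1 p.2) :=
    List.map_congr_left (fun p _ => lookup_eq k p.1 p.2)
  rw [loopA_eq (generateKeyMatrixA k) pt pt.length 0 (by omega) [], List.nil_append,
    List.drop_zero, pairsB_eq, hmap]
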